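-- pv_equiv track=rewrite | github.com/pypi-data/pypi-mirror-341 | packages/alphatriangle/alphatriangle-0.3.2-py3-none-any.whl/alphatriangle/environment/shapes/logic.py | is_shape_connected
-- ===== SOURCE A (Python) =====
-- def get_neighbors(r: int, c: int, is_up: bool) -> list[tuple[int, int]]:
--     """Gets potential neighbor coordinates for a triangle."""
--     if is_up:
--         # Up-pointing triangle neighbors: Left, Right, Below
--         return [(r, c - 1), (r, c + 1), (r + 1, c)]
--     else:
--         # Down-pointing triangle neighbors: Left, Right, Above
--         return [(r, c - 1), (r, c + 1), (r - 1, c)]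
--
-- def is_shape_connected(triangles: list[tuple[int, int, bool]]) -> bool:
--     """Checks if all triangles in a shape definition are connected."""
--     if not triangles or len(triangles) == 1:
--         return True
--
--     adj: dict[tuple[int, int], list[tuple[int, int]]] = {}
--     triangle_coords = {(r, c) for r, c, _ in triangles}
--
--     for r, c, is_up in triangles:
--         pos = (r, c)
--         if pos not in adj:
--             adj[pos] = []
--         for nr, nc in get_neighbors(r, c, is_up):
--             neighbor_pos = (nr, nc)
--             if neighbor_pos in triangle_coords:
--                 if neighbor_pos not in adj:
--                     adj[neighbor_pos] = []
--                 if neighbor_pos not in adj[pos]: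
--                     adj[pos].append(neighbor_pos)
--                 if pos not in adj[neighbor_pos]:
--                     adj[neighbor_pos].append(pos)
--
--     # Perform BFS or DFS to check connectivity
--     start_node = (triangles[0][0], triangles[0][1])
--     visited = {start_node}
--     queue = [start_node]
--     while queue:
--         node = queue.pop(0)
--         if node in adj:
--             for neighbor in adj[node]:
--                 if neighbor not in visited:
--                     visited.add(neighbor)
--                     queue.append(neighbor)
--
--     return len(visited) == len(triangle_coords)
-- ===== SOURCE B (Python) =====
-- def get_neighbors(r: int, c: int, is_up: bool) -> list[tuple[int, int]]:
--     """Gets potential neighbor coordinates for a triangle."""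
--     if is_up:
--         return [(r, c - 1), (r, c + 1), (r + 1, c)]
--     else:
--         return [(r, c - 1), (r, c + 1), (r - 1, c)]
--
-- def is_shape_connected(triangles: list[tuple[int, int, bool]]) -> bool:
--     """Checks if all triangles in a shape definition are connected.
--
--     Edge-list relaxation: build the undirected edge list once, then grow the
--     set reached from the first triangle to a fixpoint by sweeping the edges.
--     """
--     if not triangles or len(triangles) == 1:
--         return True
--
--     coords = {(r, c) for r, c, _ in triangles}
--     edges = [((r, c), n) for r, c, is_up in triangles
--              for n in get_neighbors(r, c, is_up) if n in coords]
--
--     reached = {(triangles[0][0], triangles[0][1])}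
--     changed = True
--     while changed:
--         changed = False
--         for a, b in edges:
--             if (a in reached) != (b in reached):
--                 reached.add(a)
--                 reached.add(b)
--                 changed = True
--
--     return len(reached) == len(coords)
-- ===== Notes on version B (the rewrite author's own statement) =====
-- stated objective: alternative
-- what changed: Replaces A's incrementally-built adjacency dictionary plus BFS queue traversal with a one-shot undirected edge list swept repeatedly to a fixpoint (edge relaxation), keeping only a reached set and a changed flag.
import Mathlib
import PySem

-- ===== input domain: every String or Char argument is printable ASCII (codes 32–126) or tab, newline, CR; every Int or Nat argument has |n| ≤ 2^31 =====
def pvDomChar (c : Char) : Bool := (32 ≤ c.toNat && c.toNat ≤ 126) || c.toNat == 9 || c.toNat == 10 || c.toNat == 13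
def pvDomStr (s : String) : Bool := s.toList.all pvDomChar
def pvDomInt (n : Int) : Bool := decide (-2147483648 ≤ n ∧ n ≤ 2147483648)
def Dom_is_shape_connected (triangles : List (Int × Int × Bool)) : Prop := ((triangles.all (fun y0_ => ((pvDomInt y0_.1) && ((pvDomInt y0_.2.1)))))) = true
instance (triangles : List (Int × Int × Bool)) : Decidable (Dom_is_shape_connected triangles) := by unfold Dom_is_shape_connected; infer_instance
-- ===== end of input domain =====

-- B replaces A's adjacency-dict + BFS by a one-shot undirected edge list swept to a
-- fixpoint (edge relaxation); same return value, different data structure (objective: alternative).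

abbrev Coord := Int × Int

-- ===== PORT A =====
def get_neighbors (r c : Int) (is_up : Bool) : List Coord :=
  if is_up then [(r, c - 1), (r, c + 1), (r + 1, c)]
  else [(r, c - 1), (r, c + 1), (r - 1, c)]

-- inner body of A's neighbor loop (dict updates for one neighbor)
def adjInner (coords : PySem.Set Coord) (pos : Coord)
    (adj : PySem.Dict Coord (List Coord)) (np : Coord) : PySem.Dict Coord (List Coord) :=
  if PySem.Set.contains coords np then
    let adj := if adj.contains np then adj else adj.insert np []
    let adj := if np ∈ adj.getD pos [] then adj else adj.modify pos [] (· ++ [np])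
    if pos ∈ adj.getD np [] then adj else adj.modify np [] (· ++ [pos])
  else adj

-- one iteration of A's outer adjacency-building loop
def adjStep (coords : PySem.Set Coord)
    (adj : PySem.Dict Coord (List Coord)) (t : Int × Int × Bool) : PySem.Dict Coord (List Coord) :=
  (get_neighbors t.1 t.2.1 t.2.2).foldl (adjInner coords (t.1, t.2.1))
    (if adj.contains (t.1, t.2.1) then adj else adj.insert (t.1, t.2.1) [])

-- body of A's 'for neighbor in adj[node]' loop
def bfsScan (vq : PySem.Set Coord × List Coord) (nb : Coord) : PySem.Set Coord × List Coord :=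
  if PySem.Set.contains vq.1 nb then vq else (PySem.Set.add vq.1 nb, vq.2 ++ [nb])

-- A's 'while queue' loop; fuel makes it total (fuel = |coords| is proved sufficient below)
def bfsLoop (adj : PySem.Dict Coord (List Coord)) :
    Nat → PySem.Set Coord → List Coord → PySem.Set Coord
  | 0, visited, _ => visited
  | _ + 1, visited, [] => visited
  | fuel + 1, visited, node :: rest =>
    if adj.contains node then
      let vq := (adj.getD node []).foldl bfsScan (visited, rest)
      bfsLoop adj fuel vq.1 vq.2
    else
      bfsLoop adj fuel visited rest

def is_shape_connected (triangles : List (Int × Int × Bool)) : Bool :=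
  match triangles with
  | [] => true
  | [_] => true
  | t0 :: _ :: _ =>
    let coords : PySem.Set Coord := PySem.Set.ofList (triangles.map (fun t => (t.1, t.2.1)))
    let adj := triangles.foldl (adjStep coords) PySem.Dict.empty
    let start : Coord := (t0.1, t0.2.1)
    let visited := bfsLoop adj coords.length (PySem.Set.ofList [start]) [start]
    visited.length == coords.length

-- ===== PORT B =====
-- one sweep over the edge list: body of B's 'for a, b in edges' loop
def relaxPass (edges : List (Coord × Coord)) (st : PySem.Set Coord × Bool) : PySem.Set Coord × Bool :=
  edges.foldl
    (fun st e =>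
      if (PySem.Set.contains st.1 e.1) != (PySem.Set.contains st.1 e.2) then
        (PySem.Set.add (PySem.Set.add st.1 e.1) e.2, true)
      else st) st

-- B's 'while changed' loop; fuel makes it total (fuel = |coords| is proved sufficient below)
def relaxLoop (edges : List (Coord × Coord)) : Nat → PySem.Set Coord → PySem.Set Coord
  | 0, reached => reached
  | fuel + 1, reached =>
    let st := relaxPass edges (reached, false)
    if st.2 then relaxLoop edges fuel st.1 else st.1

def is_shape_connected_alt (triangles : List (Int × Int × Bool)) : Bool :=
  match triangles with
  | [] => true
  | [_] => true
  | t0 :: _ :: _ =>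
    let coords : PySem.Set Coord := PySem.Set.ofList (triangles.map (fun t => (t.1, t.2.1)))
    let edges := triangles.flatMap (fun t =>
      ((get_neighbors t.1 t.2.1 t.2.2).filter (fun n => PySem.Set.contains coords n)).map
        (fun n => ((t.1, t.2.1), n)))
    let reached := relaxLoop edges coords.length (PySem.Set.ofList [(t0.1, t0.2.1)])
    reached.length == coords.length

-- ===== PRECONDITION & SPEC =====
def Spec_is_shape_connected (triangles : List (Int × Int × Bool)) (out : Bool) : Prop := out = is_shape_connected_alt triangles
instance (triangles : List (Int × Int × Bool)) (out : Bool) : Decidable (Spec_is_shape_connected triangles out) := by unfold Spec_is_shape_connected; infer_instance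

-- ===== CLAIM (what is proved, stated in full; the proofs are below) =====
def Claim_equal_is_shape_connected : Prop := ∀ (triangles : List (Int × Int × Bool)), Dom_is_shape_connected triangles → Spec_is_shape_connected triangles (is_shape_connected triangles)

-- ===== LEMMAS AND PROOFS =====

-- the raw (directed) neighbour relation both programs derive their edges from
def RawT (t : Int × Int × Bool) (coords : PySem.Set Coord) (p q : Coord) : Prop :=
  p = (t.1, t.2.1) ∧ q ∈ get_neighbors t.1 t.2.1 t.2.2 ∧ PySem.Set.contains coords q = true

def RawR (triangles : List (Int × Int × Bool)) (coords : PySem.Set Coord) (p q : Coord) : Prop :=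
  ∃ t ∈ triangles, RawT t coords p q

-- ---- characterisation of A's adjacency dict ----

theorem getD_ensure (d : PySem.Dict Coord (List Coord)) (n p : Coord) :
    ((if d.contains n then d else d.insert n []).getD p []) = d.getD p [] := by
  split_ifs with h
  · rfl
  · rw [PySem.Dict.getD_insert]
    split_ifs with hp
    · subst hp
      exact (PySem.Dict.getD_of_not_contains _ [] (by simpa using h)).symm
    · rfl

theorem mem_getD_addEdge (d : PySem.Dict Coord (List Coord)) (a b p q : Coord) :
    (q ∈ (if b ∈ d.getD a [] then d else d.modify a [] (· ++ [b])).getD p []) ↔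
      q ∈ d.getD p [] ∨ (p = a ∧ q = b) := by
  split_ifs with h
  · constructor
    · exact fun hq => Or.inl hq
    · rintro (hq | ⟨rfl, rfl⟩)
      · exact hq
      · exact h
  · rw [PySem.Dict.getD_modify]
    split_ifs with hp
    · subst hp
      simp only [List.mem_append, List.mem_singleton]
      tauto
    · simp [hp]

theorem mem_getD_adjInner (coords : PySem.Set Coord) (pos : Coord)
    (d : PySem.Dict Coord (List Coord)) (np p q : Coord) :
    (q ∈ (adjInner coords pos d np).getD p []) ↔
      q ∈ d.getD p [] ∨
        (PySem.Set.contains coords np = true ∧ ((p = pos ∧ q = np) ∨ (p = np ∧ q = pos))) := by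
  unfold adjInner
  by_cases hc : PySem.Set.contains coords np = true
  · rw [if_pos hc, mem_getD_addEdge, mem_getD_addEdge, getD_ensure]
    simp only [hc, true_and]
    tauto
  · rw [if_neg hc]
    constructor
    · exact fun h => Or.inl h
    · rintro (h | ⟨hcc, _⟩)
      · exact h
      · exact absurd hcc hc

theorem mem_getD_adjInner_fold (coords : PySem.Set Coord) (pos : Coord)
    (ns : List Coord) (d : PySem.Dict Coord (List Coord)) (p q : Coord) :
    (q ∈ (ns.foldl (adjInner coords pos) d).getD p []) ↔
      q ∈ d.getD p [] ∨
        ∃ n ∈ ns, PySem.Set.contains coords n = true ∧ ((p = pos ∧ q = n) ∨ (p = n ∧ q = pos)) := by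
  induction ns generalizing d with
  | nil => simp
  | cons n ns ih =>
    rw [List.foldl_cons, ih, mem_getD_adjInner]
    constructor
    · rintro ((h | h) | ⟨m, hm, h⟩)
      · exact Or.inl h
      · exact Or.inr ⟨n, by simp, h⟩
      · exact Or.inr ⟨m, by simp [hm], h⟩
    · rintro (h | ⟨m, hm, h⟩)
      · exact Or.inl (Or.inl h)
      · rcases List.mem_cons.mp hm with rfl | hm
        · exact Or.inl (Or.inr h)
        · exact Or.inr ⟨m, hm, h⟩

theorem mem_getD_adjStep (coords : PySem.Set Coord) (d : PySem.Dict Coord (List Coord))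
    (t : Int × Int × Bool) (p q : Coord) :
    (q ∈ (adjStep coords d t).getD p []) ↔
      q ∈ d.getD p [] ∨ RawT t coords p q ∨ RawT t coords q p := by
  unfold adjStep
  rw [mem_getD_adjInner_fold, getD_ensure]
  unfold RawT
  constructor
  · rintro (hq | ⟨n, hn, hcn, (⟨rfl, rfl⟩ | ⟨rfl, rfl⟩)⟩)
    · exact Or.inl hq
    · exact Or.inr (Or.inl ⟨rfl, hn, hcn⟩)
    · exact Or.inr (Or.inr ⟨rfl, hn, hcn⟩)
  · rintro (hq | ⟨rfl, hn, hcn⟩ | ⟨rfl, hn, hcn⟩)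
    · exact Or.inl hq
    · exact Or.inr ⟨q, hn, hcn, Or.inl ⟨rfl, rfl⟩⟩
    · exact Or.inr ⟨p, hn, hcn, Or.inr ⟨rfl, rfl⟩⟩

theorem mem_getD_adjFold (coords : PySem.Set Coord) (triangles : List (Int × Int × Bool))
    (d : PySem.Dict Coord (List Coord)) (p q : Coord) :
    (q ∈ (triangles.foldl (adjStep coords) d).getD p []) ↔
      q ∈ d.getD p [] ∨ ∃ t ∈ triangles, RawT t coords p q ∨ RawT t coords q p := by
  induction triangles generalizing d with
  | nil => simp
  | cons t ts ih =>
    rw [List.foldl_cons, ih, mem_getD_adjStep]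
    constructor
    · rintro ((h | h) | ⟨s, hs, h⟩)
      · exact Or.inl h
      · exact Or.inr ⟨t, by simp, h⟩
      · exact Or.inr ⟨s, by simp [hs], h⟩
    · rintro (h | ⟨s, hs, h⟩)
      · exact Or.inl (Or.inl h)
      · rcases List.mem_cons.mp hs with rfl | hs
        · exact Or.inl (Or.inr h)
        · exact Or.inr ⟨s, hs, h⟩

theorem mem_adj (coords : PySem.Set Coord) (triangles : List (Int × Int × Bool)) (p q : Coord) :
    (q ∈ (triangles.foldl (adjStep coords) PySem.Dict.empty).getD p []) ↔
      RawR triangles coords p q ∨ RawR triangles coords q p := by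
  rw [mem_getD_adjFold]
  unfold RawR
  constructor
  · rintro (h | ⟨t, ht, h | h⟩)
    · simp [PySem.Dict.getD_empty] at h
    · exact Or.inl ⟨t, ht, h⟩
    · exact Or.inr ⟨t, ht, h⟩
  · rintro (⟨t, ht, h⟩ | ⟨t, ht, h⟩)
    · exact Or.inr ⟨t, ht, Or.inl h⟩
    · exact Or.inr ⟨t, ht, Or.inr h⟩

theorem mem_edges (coords : PySem.Set Coord) (triangles : List (Int × Int × Bool))
    (e : Coord × Coord) :
    (e ∈ triangles.flatMap (fun t =>
        ((get_neighbors t.1 t.2.1 t.2.2).filter (fun n => PySem.Set.contains coords n)).map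
          (fun n => ((t.1, t.2.1), n)))) ↔ RawR triangles coords e.1 e.2 := by
  unfold RawR RawT
  rw [List.mem_flatMap]
  constructor
  · rintro ⟨t, ht, hmem⟩
    rw [List.mem_map] at hmem
    obtain ⟨n, hn, hne⟩ := hmem
    rw [List.mem_filter] at hn
    cases hne
    exact ⟨t, ht, rfl, hn.1, hn.2⟩
  · rintro ⟨t, ht, h1, h2, h3⟩
    refine ⟨t, ht, ?_⟩
    rw [List.mem_map]
    refine ⟨e.2, ?_, ?_⟩
    · rw [List.mem_filter]
      exact ⟨h2, h3⟩
    · rw [← h1]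

-- ---- A's BFS: scan of one adjacency list ----

theorem bfsScan_step (v : PySem.Set Coord) (qu : List Coord) (n : Coord) :
    bfsScan (v, qu) n =
      if PySem.Set.contains v n then (v, qu) else (PySem.Set.add v n, qu ++ [n]) := rfl

theorem bfsScan_mem (ns : List Coord) (v : PySem.Set Coord) (qu : List Coord) (x : Coord) :
    x ∈ (ns.foldl bfsScan (v, qu)).1 ↔ x ∈ v ∨ x ∈ ns := by
  induction ns generalizing v qu with
  | nil => simp
  | cons n ns ih =>
    rw [List.foldl_cons, bfsScan_step]
    split_ifs with h
    · rw [ih]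
      have hn : n ∈ v := (PySem.Set.contains_iff _ _).mp h
      simp
      constructor
      · tauto
      · rintro (h1 | rfl | h2) <;> tauto
    · rw [ih]
      simp [PySem.Set.mem_add]
      tauto

theorem bfsScan_queue_sub (ns : List Coord) (v : PySem.Set Coord) (qu : List Coord) (x : Coord) :
    x ∈ (ns.foldl bfsScan (v, qu)).2 → x ∈ qu ∨ x ∈ ns := by
  induction ns generalizing v qu with
  | nil => simp
  | cons n ns ih =>
    rw [List.foldl_cons, bfsScan_step]
    split_ifs with h
    · intro hx
      rcases ih _ _ hx with h1 | h1
      · exact Or.inl h1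
      · exact Or.inr (by simp [h1])
    · intro hx
      rcases ih _ _ hx with h1 | h1
      · rcases List.mem_append.mp h1 with h1 | h1
        · exact Or.inl h1
        · simp at h1
          exact Or.inr (by simp [h1])
      · exact Or.inr (by simp [h1])

theorem bfsScan_queue_sup (ns : List Coord) (v : PySem.Set Coord) (qu : List Coord) (x : Coord)
    (hx : x ∈ qu) : x ∈ (ns.foldl bfsScan (v, qu)).2 := by
  induction ns generalizing v qu with
  | nil => exact hx
  | cons n ns ih =>
    rw [List.foldl_cons, bfsScan_step]
    split_ifs with h
    · exact ih _ _ hx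
    · exact ih _ _ (List.mem_append.mpr (Or.inl hx))

theorem bfsScan_nodup (ns : List Coord) (v : PySem.Set Coord) (qu : List Coord)
    (hv : v.Nodup) : (ns.foldl bfsScan (v, qu)).1.Nodup := by
  induction ns generalizing v qu with
  | nil => exact hv
  | cons n ns ih =>
    rw [List.foldl_cons, bfsScan_step]
    split_ifs with h
    · exact ih _ _ hv
    · exact ih _ _ (PySem.Set.nodup_add _ _ hv)

theorem bfsScan_len (ns : List Coord) (v : PySem.Set Coord) (qu : List Coord) :
    (ns.foldl bfsScan (v, qu)).1.length + qu.length =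
      v.length + (ns.foldl bfsScan (v, qu)).2.length := by
  induction ns generalizing v qu with
  | nil => simp
  | cons n ns ih =>
    rw [List.foldl_cons, bfsScan_step]
    split_ifs with h
    · exact ih _ _
    · have hadd : PySem.Set.add v n = v ++ [n] :=
        PySem.Set.add_of_not_mem (fun hm => h ((PySem.Set.contains_iff _ _).mpr hm))
      rw [hadd]
      have := ih (v ++ [n]) (qu ++ [n])
      simp [List.length_append] at this ⊢
      omega

theorem bfsScan_inv (ns : List Coord) (v : PySem.Set Coord) (qu : List Coord)
    (P : Coord → Prop) (hinv : ∀ x ∈ v, P x ∨ x ∈ qu) :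
    ∀ x ∈ (ns.foldl bfsScan (v, qu)).1, P x ∨ x ∈ (ns.foldl bfsScan (v, qu)).2 := by
  induction ns generalizing v qu with
  | nil => exact hinv
  | cons n ns ih =>
    rw [List.foldl_cons, bfsScan_step]
    split_ifs with h
    · exact ih _ _ hinv
    · refine ih _ _ ?_
      intro x hx
      rcases (PySem.Set.mem_add _ _ _).mp hx with h1 | rfl
      · rcases hinv x h1 with hp | hq
        · exact Or.inl hp
        · exact Or.inr (List.mem_append.mpr (Or.inl hq))
      · exact Or.inr (List.mem_append.mpr (Or.inr (by simp)))

-- unified one-step unfolding of A's BFS loop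
theorem bfsLoop_cons (adj : PySem.Dict Coord (List Coord)) (fuel : Nat)
    (v : PySem.Set Coord) (node : Coord) (rest : List Coord) :
    bfsLoop adj (fuel + 1) v (node :: rest) =
      bfsLoop adj fuel ((adj.getD node []).foldl bfsScan (v, rest)).1
        ((adj.getD node []).foldl bfsScan (v, rest)).2 := by
  have heq : bfsLoop adj (fuel + 1) v (node :: rest) =
      if adj.contains node then
        bfsLoop adj fuel ((adj.getD node []).foldl bfsScan (v, rest)).1
          ((adj.getD node []).foldl bfsScan (v, rest)).2
      else bfsLoop adj fuel v rest := rfl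
  rw [heq]
  split_ifs with h
  · rfl
  · rw [PySem.Dict.getD_of_not_contains _ [] (by simpa using h)]
    rfl

theorem bfsLoop_least (adj : PySem.Dict Coord (List Coord)) (S : List Coord)
    (hS : ∀ p ∈ S, ∀ x ∈ adj.getD p [], x ∈ S) :
    ∀ (fuel : Nat) (v : PySem.Set Coord) (qu : List Coord),
      (∀ x ∈ v, x ∈ S) → (∀ x ∈ qu, x ∈ S) →
      ∀ x ∈ bfsLoop adj fuel v qu, x ∈ S := by
  intro fuel
  induction fuel with
  | zero => intro v qu hv _ x hx; exact hv x hx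
  | succ fuel ih =>
    intro v qu hv hq x hx
    match qu with
    | [] => exact hv x hx
    | node :: rest =>
      rw [bfsLoop_cons] at hx
      have hns : ∀ y ∈ adj.getD node [], y ∈ S := hS node (hq node (by simp))
      refine ih _ _ ?_ ?_ x hx
      · intro y hy
        rcases (bfsScan_mem _ _ _ y).mp hy with h1 | h1
        · exact hv y h1
        · exact hns y h1
      · intro y hy
        rcases bfsScan_queue_sub _ _ _ y hy with h1 | h1
        · exact hq y (by simp [h1])
        · exact hns y h1

theorem bfsLoop_main (adj : PySem.Dict Coord (List Coord)) (coordsL : PySem.Set Coord)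
    (hrange : ∀ p x, x ∈ adj.getD p [] → x ∈ coordsL) :
    ∀ (fuel : Nat) (v : PySem.Set Coord) (qu : List Coord),
      v.Nodup → (∀ x ∈ v, x ∈ coordsL) → (∀ x ∈ qu, x ∈ v) →
      (∀ p ∈ v, p ∉ qu → ∀ x ∈ adj.getD p [], x ∈ v) →
      coordsL.length + qu.length ≤ fuel + v.length →
      (∀ x ∈ v, x ∈ bfsLoop adj fuel v qu) ∧ (bfsLoop adj fuel v qu).Nodup ∧
        (∀ x ∈ bfsLoop adj fuel v qu, x ∈ coordsL) ∧
        (∀ p ∈ bfsLoop adj fuel v qu, ∀ x ∈ adj.getD p [], x ∈ bfsLoop adj fuel v qu) := by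
  intro fuel
  induction fuel with
  | zero =>
    intro v qu hnd hvc hqv hcl hfuel
    have hvlen : v.length ≤ coordsL.length :=
      List.Subperm.length_le (List.subperm_of_subset hnd hvc)
    have hq0 : qu = [] := List.length_eq_zero_iff.mp (by omega)
    subst hq0
    exact ⟨fun x hx => hx, hnd, hvc, fun p hp => hcl p hp (by simp)⟩
  | succ fuel ih =>
    intro v qu hnd hvc hqv hcl hfuel
    match qu with
    | [] =>
      exact ⟨fun x hx => hx, hnd, hvc, fun p hp => hcl p hp (by simp)⟩
    | node :: rest =>
      rw [bfsLoop_cons]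
      set ns := adj.getD node [] with hns
      set vq := ns.foldl bfsScan (v, rest) with hvq
      have hmem : ∀ x, x ∈ vq.1 ↔ x ∈ v ∨ x ∈ ns := fun x => bfsScan_mem ns v rest x
      have hrest : ∀ x ∈ rest, x ∈ vq.2 := fun x hx => bfsScan_queue_sup ns v rest x hx
      have h1 : vq.1.Nodup := bfsScan_nodup ns v rest hnd
      have h2 : ∀ x ∈ vq.1, x ∈ coordsL := by
        intro x hx
        rcases (hmem x).mp hx with h | h
        · exact hvc x h
        · exact hrange node x h
      have h3 : ∀ x ∈ vq.2, x ∈ vq.1 := by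
        intro x hx
        rcases bfsScan_queue_sub ns v rest x hx with h | h
        · exact (hmem x).mpr (Or.inl (hqv x (by simp [h])))
        · exact (hmem x).mpr (Or.inr h)
      have h4 : ∀ p ∈ vq.1, p ∉ vq.2 → ∀ x ∈ adj.getD p [], x ∈ vq.1 := by
        intro p hp hpq x hx
        by_cases hpn : p = node
        · subst hpn
          exact (hmem x).mpr (Or.inr hx)
        · by_cases hpv : p ∈ v
          · have hpr : p ∉ node :: rest := by
              intro hc
              rcases List.mem_cons.mp hc with hc | hc
              · exact hpn hc
              · exact hpq (hrest p hc)
            exact (hmem x).mpr (Or.inl (hcl p hpv hpr x hx))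
          · exfalso
            rcases bfsScan_inv ns v rest (fun y => y ∈ v) (fun y hy => Or.inl hy) p hp with h | h
            · exact hpv h
            · exact hpq h
      have h5 : coordsL.length + vq.2.length ≤ fuel + vq.1.length := by
        have hl := bfsScan_len ns v rest
        rw [← hvq] at hl
        simp at hfuel
        omega
      obtain ⟨c1, c2, c3, c4⟩ := ih vq.1 vq.2 h1 h2 h3 h4 h5
      refine ⟨?_, c2, c3, c4⟩
      intro x hx
      exact c1 x ((hmem x).mpr (Or.inl hx))

-- ---- B's edge relaxation ----

theorem relaxPass_cons (e : Coord × Coord) (es : List (Coord × Coord))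
    (st : PySem.Set Coord × Bool) :
    relaxPass (e :: es) st =
      relaxPass es
        (if (PySem.Set.contains st.1 e.1) != (PySem.Set.contains st.1 e.2) then
          (PySem.Set.add (PySem.Set.add st.1 e.1) e.2, true)
        else st) := rfl

theorem xor_mem (r : PySem.Set Coord) (a b : Coord)
    (h : (PySem.Set.contains r a != PySem.Set.contains r b) = true) :
    (a ∈ r ∧ b ∉ r) ∨ (b ∈ r ∧ a ∉ r) := by
  rcases Bool.eq_false_or_eq_true (PySem.Set.contains r a) with ha | ha <;>
    rcases Bool.eq_false_or_eq_true (PySem.Set.contains r b) with hb | hb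
  · rw [ha, hb] at h
    simp at h
  · exact Or.inl ⟨(PySem.Set.contains_iff _ _).mp ha,
      fun hm => absurd ((PySem.Set.contains_iff _ _).mpr hm) (by rw [hb]; simp)⟩
  · exact Or.inr ⟨(PySem.Set.contains_iff _ _).mp hb,
      fun hm => absurd ((PySem.Set.contains_iff _ _).mpr hm) (by rw [ha]; simp)⟩
  · rw [ha, hb] at h
    simp at h

theorem add_len_ge (r : PySem.Set Coord) (x : Coord) :
    r.length ≤ (PySem.Set.add r x).length := by
  rw [PySem.Set.add_eq_ite _ _]
  split_ifs <;> simp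

theorem relaxPass_mono (edges : List (Coord × Coord)) (r : PySem.Set Coord) (ch : Bool)
    (x : Coord) (hx : x ∈ r) : x ∈ (relaxPass edges (r, ch)).1 := by
  induction edges generalizing r ch with
  | nil => exact hx
  | cons e es ih =>
    rw [relaxPass_cons]
    dsimp only
    split_ifs with h
    · exact ih _ _ ((PySem.Set.mem_add _ _ _).mpr (Or.inl ((PySem.Set.mem_add _ _ _).mpr (Or.inl hx))))
    · exact ih _ _ hx

theorem relaxPass_mem (edges : List (Coord × Coord)) (r : PySem.Set Coord) (ch : Bool)
    (x : Coord) (hx : x ∈ (relaxPass edges (r, ch)).1) :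
    x ∈ r ∨ ∃ e ∈ edges, x = e.1 ∨ x = e.2 := by
  induction edges generalizing r ch with
  | nil => exact Or.inl hx
  | cons e es ih =>
    rw [relaxPass_cons] at hx
    dsimp only at hx
    split_ifs at hx with h
    · rcases ih _ _ hx with h1 | ⟨e', he', h2⟩
      · rcases (PySem.Set.mem_add _ _ _).mp h1 with h1 | rfl
        · rcases (PySem.Set.mem_add _ _ _).mp h1 with h1 | rfl
          · exact Or.inl h1
          · exact Or.inr ⟨e, by simp, Or.inl rfl⟩
        · exact Or.inr ⟨e, by simp, Or.inr rfl⟩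
      · exact Or.inr ⟨e', by simp [he'], h2⟩
    · rcases ih _ _ hx with h1 | ⟨e', he', h2⟩
      · exact Or.inl h1
      · exact Or.inr ⟨e', by simp [he'], h2⟩

theorem relaxPass_nodup (edges : List (Coord × Coord)) (r : PySem.Set Coord) (ch : Bool)
    (hr : r.Nodup) : (relaxPass edges (r, ch)).1.Nodup := by
  induction edges generalizing r ch with
  | nil => exact hr
  | cons e es ih =>
    rw [relaxPass_cons]
    dsimp only
    split_ifs with h
    · exact ih _ _ (PySem.Set.nodup_add _ _ (PySem.Set.nodup_add _ _ hr))
    · exact ih _ _ hr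

theorem relaxPass_len_mono (edges : List (Coord × Coord)) (r : PySem.Set Coord) (ch : Bool) :
    r.length ≤ (relaxPass edges (r, ch)).1.length := by
  induction edges generalizing r ch with
  | nil => exact Nat.le_refl _
  | cons e es ih =>
    rw [relaxPass_cons]
    dsimp only
    split_ifs with h
    · exact Nat.le_trans (Nat.le_trans (add_len_ge r e.1) (add_len_ge _ e.2)) (ih _ _)
    · exact ih _ _

theorem relaxPass_flag_mono (edges : List (Coord × Coord)) (r : PySem.Set Coord) :
    (relaxPass edges (r, true)).2 = true := by
  induction edges generalizing r with
  | nil => rfl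
  | cons e es ih =>
    rw [relaxPass_cons]
    dsimp only
    split_ifs with h
    · exact ih _
    · exact ih _

theorem relaxPass_least (edges : List (Coord × Coord)) (S : List Coord)
    (hS : ∀ e ∈ edges, (e.1 ∈ S → e.2 ∈ S) ∧ (e.2 ∈ S → e.1 ∈ S)) :
    ∀ (r : PySem.Set Coord) (ch : Bool), (∀ x ∈ r, x ∈ S) →
      ∀ x ∈ (relaxPass edges (r, ch)).1, x ∈ S := by
  induction edges with
  | nil => intro r ch hr; exact hr
  | cons e es ih =>
    intro r ch hr x hx
    rw [relaxPass_cons] at hx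
    dsimp only at hx
    have hSes : ∀ e' ∈ es, (e'.1 ∈ S → e'.2 ∈ S) ∧ (e'.2 ∈ S → e'.1 ∈ S) :=
      fun e' he' => hS e' (by simp [he'])
    split_ifs at hx with h
    · have hone : e.1 ∈ S ∧ e.2 ∈ S := by
        rcases xor_mem r e.1 e.2 h with ⟨hm1, _⟩ | ⟨hm2, _⟩
        · have he1 := hr _ hm1
          exact ⟨he1, (hS e (by simp)).1 he1⟩
        · have he2 := hr _ hm2
          exact ⟨(hS e (by simp)).2 he2, he2⟩
      refine ih hSes _ _ ?_ x hx
      intro y hy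
      rcases (PySem.Set.mem_add _ _ _).mp hy with hy | rfl
      · rcases (PySem.Set.mem_add _ _ _).mp hy with hy | rfl
        · exact hr y hy
        · exact hone.1
      · exact hone.2
    · exact ih hSes _ _ hr x hx

theorem relaxPass_unchanged (edges : List (Coord × Coord)) (r : PySem.Set Coord)
    (h : (relaxPass edges (r, false)).2 = false) :
    (relaxPass edges (r, false)).1 = r ∧ ∀ e ∈ edges, (e.1 ∈ r ↔ e.2 ∈ r) := by
  induction edges generalizing r with
  | nil => exact ⟨rfl, by simp⟩
  | cons e es ih =>
    rw [relaxPass_cons] at h ⊢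
    dsimp only at h ⊢
    split_ifs at h ⊢ with hf
    · exfalso
      rw [relaxPass_flag_mono es (PySem.Set.add (PySem.Set.add r e.1) e.2)] at h
      simp at h
    · obtain ⟨h1, h2⟩ := ih r h
      have hceq : PySem.Set.contains r e.1 = PySem.Set.contains r e.2 := by
        rcases Bool.eq_false_or_eq_true (PySem.Set.contains r e.1) with a | a
        · rcases Bool.eq_false_or_eq_true (PySem.Set.contains r e.2) with b | b
          · rw [a, b]
          · exfalso; rw [a, b] at hf; exact hf rfl
        · rcases Bool.eq_false_or_eq_true (PySem.Set.contains r e.2) with b | b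
          · exfalso; rw [a, b] at hf; exact hf rfl
          · rw [a, b]
      refine ⟨h1, ?_⟩
      intro e' he'
      rcases List.mem_cons.mp he' with rfl | he'
      · constructor
        · intro hm
          exact (PySem.Set.contains_iff _ _).mp (hceq ▸ (PySem.Set.contains_iff _ _).mpr hm)
        · intro hm
          exact (PySem.Set.contains_iff _ _).mp (hceq.symm ▸ (PySem.Set.contains_iff _ _).mpr hm)
      · exact h2 e' he'

theorem relaxPass_changed_len (edges : List (Coord × Coord)) (r : PySem.Set Coord)
    (hr : r.Nodup) (h : (relaxPass edges (r, false)).2 = true) :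
    r.length < (relaxPass edges (r, false)).1.length := by
  induction edges generalizing r with
  | nil => simp [relaxPass] at h
  | cons e es ih =>
    rw [relaxPass_cons] at h ⊢
    dsimp only at h ⊢
    split_ifs at h ⊢ with hf
    · rcases xor_mem r e.1 e.2 hf with ⟨hm1, hne⟩ | ⟨hm2, hne⟩
      · rw [PySem.Set.add_of_mem hm1, PySem.Set.add_of_not_mem hne]
        exact Nat.lt_of_lt_of_le (by simp) (relaxPass_len_mono es _ true)
      · rw [PySem.Set.add_of_not_mem hne,
          PySem.Set.add_of_mem (List.mem_append.mpr (Or.inl hm2))]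
        exact Nat.lt_of_lt_of_le (by simp) (relaxPass_len_mono es _ true)
    · exact ih r hr h

theorem relaxLoop_succ (edges : List (Coord × Coord)) (fuel : Nat) (r : PySem.Set Coord) :
    relaxLoop edges (fuel + 1) r =
      if (relaxPass edges (r, false)).2 then relaxLoop edges fuel (relaxPass edges (r, false)).1
      else (relaxPass edges (r, false)).1 := rfl

theorem relaxLoop_least (edges : List (Coord × Coord)) (S : List Coord)
    (hS : ∀ e ∈ edges, (e.1 ∈ S → e.2 ∈ S) ∧ (e.2 ∈ S → e.1 ∈ S)) :
    ∀ (fuel : Nat) (r : PySem.Set Coord), (∀ x ∈ r, x ∈ S) →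
      ∀ x ∈ relaxLoop edges fuel r, x ∈ S := by
  intro fuel
  induction fuel with
  | zero => intro r hr; exact hr
  | succ fuel ih =>
    intro r hr x hx
    rw [relaxLoop_succ] at hx
    split_ifs at hx with h
    · exact ih _ (relaxPass_least edges S hS r false hr) x hx
    · exact relaxPass_least edges S hS r false hr x hx

theorem relaxLoop_main (edges : List (Coord × Coord)) (coordsL : PySem.Set Coord)
    (hend : ∀ e ∈ edges, e.1 ∈ coordsL ∧ e.2 ∈ coordsL) :
    ∀ (fuel : Nat) (r : PySem.Set Coord), r.Nodup → (∀ x ∈ r, x ∈ coordsL) →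
      coordsL.length + 1 ≤ fuel + r.length →
      (∀ x ∈ r, x ∈ relaxLoop edges fuel r) ∧ (relaxLoop edges fuel r).Nodup ∧
        (∀ x ∈ relaxLoop edges fuel r, x ∈ coordsL) ∧
        (∀ e ∈ edges, (e.1 ∈ relaxLoop edges fuel r ↔ e.2 ∈ relaxLoop edges fuel r)) := by
  intro fuel
  induction fuel with
  | zero =>
    intro r hnd hrc hfuel
    exfalso
    have : r.length ≤ coordsL.length :=
      List.Subperm.length_le (List.subperm_of_subset hnd hrc)
    omega
  | succ fuel ih =>
    intro r hnd hrc hfuel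
    rw [relaxLoop_succ]
    split_ifs with h
    · have hlen : r.length < (relaxPass edges (r, false)).1.length :=
        relaxPass_changed_len edges r hnd h
      have hnd' : (relaxPass edges (r, false)).1.Nodup := relaxPass_nodup edges r false hnd
      have hrc' : ∀ x ∈ (relaxPass edges (r, false)).1, x ∈ coordsL := by
        intro x hx
        rcases relaxPass_mem edges r false x hx with h1 | ⟨e, he, h2⟩
        · exact hrc x h1
        · rcases h2 with rfl | rfl
          · exact (hend e he).1
          · exact (hend e he).2
      obtain ⟨c1, c2, c3, c4⟩ := ih _ hnd' hrc' (by omega)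
      exact ⟨fun x hx => c1 x (relaxPass_mono edges r false x hx), c2, c3, c4⟩
    · obtain ⟨h1, h2⟩ := relaxPass_unchanged edges r (by simpa using h)
      rw [h1]
      exact ⟨fun x hx => hx, hnd, hrc, h2⟩

-- ---- unfolding the two ports on a ≥2-element list ----

theorem is_shape_connected_cons (t0 t1 : Int × Int × Bool) (rest : List (Int × Int × Bool)) :
    is_shape_connected (t0 :: t1 :: rest) =
      ((bfsLoop ((t0 :: t1 :: rest).foldl
            (adjStep (PySem.Set.ofList ((t0 :: t1 :: rest).map (fun t => (t.1, t.2.1)))))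
            PySem.Dict.empty)
          (PySem.Set.ofList ((t0 :: t1 :: rest).map (fun t => (t.1, t.2.1)))).length
          (PySem.Set.ofList [(t0.1, t0.2.1)]) [(t0.1, t0.2.1)]).length ==
        (PySem.Set.ofList ((t0 :: t1 :: rest).map (fun t => (t.1, t.2.1)))).length) := rfl

theorem is_shape_connected_alt_cons (t0 t1 : Int × Int × Bool) (rest : List (Int × Int × Bool)) :
    is_shape_connected_alt (t0 :: t1 :: rest) =
      ((relaxLoop ((t0 :: t1 :: rest).flatMap (fun t =>
            ((get_neighbors t.1 t.2.1 t.2.2).filter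
                (fun n => PySem.Set.contains (PySem.Set.ofList ((t0 :: t1 :: rest).map (fun t => (t.1, t.2.1)))) n)).map
              (fun n => ((t.1, t.2.1), n))))
          (PySem.Set.ofList ((t0 :: t1 :: rest).map (fun t => (t.1, t.2.1)))).length
          (PySem.Set.ofList [(t0.1, t0.2.1)])).length ==
        (PySem.Set.ofList ((t0 :: t1 :: rest).map (fun t => (t.1, t.2.1)))).length) := rfl

-- ===== VERDICT (by name: the statement is the Claim_ definition above) =====
theorem is_shape_connected_spec : Claim_equal_is_shape_connected := by
  intro triangles _
  unfold Spec_is_shape_connected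
  rcases triangles with _ | ⟨t0, _ | ⟨t1, rest⟩⟩
  · rfl
  · rfl
  rw [is_shape_connected_cons, is_shape_connected_alt_cons]
  set T := t0 :: t1 :: rest with hT
  set coordsL := PySem.Set.ofList (T.map (fun t => (t.1, t.2.1))) with hcoords
  set adj := T.foldl (adjStep coordsL) PySem.Dict.empty with hadjdef
  set edges := T.flatMap (fun t =>
      ((get_neighbors t.1 t.2.1 t.2.2).filter (fun n => PySem.Set.contains coordsL n)).map
        (fun n => ((t.1, t.2.1), n))) with hedgesdef
  set start : Coord := (t0.1, t0.2.1) with hstartdef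
  have hofl : PySem.Set.ofList [start] = [start] := PySem.Set.ofList_eq_self_of_nodup _ (List.nodup_singleton _)
  rw [hofl]
  have hposmem : ∀ t ∈ T, ((t.1, t.2.1) : Coord) ∈ coordsL := by
    intro t ht
    rw [hcoords]
    exact (PySem.Set.mem_ofList _ _).mpr (List.mem_map.mpr ⟨t, ht, rfl⟩)
  have hstart : start ∈ coordsL := hposmem t0 (by rw [hT]; simp)
  have hadjc : ∀ p q : Coord, (q ∈ adj.getD p []) ↔ RawR T coordsL p q ∨ RawR T coordsL q p :=
    fun p q => mem_adj coordsL T p q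
  have hedgec : ∀ e : Coord × Coord, (e ∈ edges) ↔ RawR T coordsL e.1 e.2 :=
    fun e => mem_edges coordsL T e
  have hrange : ∀ p x, x ∈ adj.getD p [] → x ∈ coordsL := by
    intro p x hx
    rcases (hadjc p x).mp hx with hr | hr
    · obtain ⟨t, ht, hr⟩ := hr
      unfold RawT at hr
      exact (PySem.Set.contains_iff _ _).mp hr.2.2
    · obtain ⟨t, ht, hr⟩ := hr
      unfold RawT at hr
      rw [hr.1]
      exact hposmem t ht
  have hend : ∀ e ∈ edges, e.1 ∈ coordsL ∧ e.2 ∈ coordsL := by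
    intro e he
    obtain ⟨t, ht, hr⟩ := (hedgec e).mp he
    unfold RawT at hr
    exact ⟨hr.1 ▸ hposmem t ht, (PySem.Set.contains_iff _ _).mp hr.2.2⟩
  obtain ⟨a1, a2, a3, a4⟩ := bfsLoop_main adj coordsL hrange coordsL.length [start] [start]
    (by simp) (by intro x hx; simp at hx; rw [hx]; exact hstart) (fun x hx => hx)
    (by intro p hp hpq; simp at hp hpq; exact absurd hp hpq) (by simp)
  obtain ⟨b1, b2, b3, b4⟩ := relaxLoop_main edges coordsL hend coordsL.length [start]
    (by simp) (by intro x hx; simp at hx; rw [hx]; exact hstart) (by simp)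
  set V := bfsLoop adj coordsL.length [start] [start] with hV
  set R := relaxLoop edges coordsL.length [start] with hR
  have hVR : ∀ x ∈ V, x ∈ R := by
    refine bfsLoop_least adj R ?_ coordsL.length [start] [start] ?_ ?_
    · intro p hp x hx
      rcases (hadjc p x).mp hx with hr | hr
      · exact (b4 (p, x) ((hedgec (p, x)).mpr hr)).1 hp
      · exact (b4 (x, p) ((hedgec (x, p)).mpr hr)).2 hp
    · intro x hx; simp at hx; rw [hx]; exact b1 start (by simp)
    · intro x hx; simp at hx; rw [hx]; exact b1 start (by simp)
  have hRV : ∀ x ∈ R, x ∈ V := by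
    refine relaxLoop_least edges V ?_ coordsL.length [start] ?_
    · intro e he
      have hr := (hedgec e).mp he
      have hmem1 : e.2 ∈ adj.getD e.1 [] := (hadjc e.1 e.2).mpr (Or.inl hr)
      have hmem2 : e.1 ∈ adj.getD e.2 [] := (hadjc e.2 e.1).mpr (Or.inr hr)
      exact ⟨fun h => a4 e.1 h e.2 hmem1, fun h => a4 e.2 h e.1 hmem2⟩
    · intro x hx; simp at hx; rw [hx]; exact a1 start (by simp)
  have hlen : V.length = R.length :=
    ((List.perm_ext_iff_of_nodup a2 b2).mpr (fun x => ⟨hVR x, hRV x⟩)).length_eq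
  rw [hlen]
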